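-- pv_equiv track=rewrite | github.com/Hazem-ali/KenKen-Solver | kenken.py | gneighbors
-- ===== SOURCE A (Python) =====
-- def RowXorCol(xy1, xy2):
--     """
--     Evaluates to true if the given positions are in the same row / column
--     but are in different columns / rows
--     """
--     return (xy1[0] == xy2[0]) != (xy1[1] == xy2[1])
--
-- def conflicting(A, a, B, b):
--     """
--     Evaluates to true if:
--       * there exists mA so that ma is a member of A and
--       * there exists mb so that mb is a member of B and
--       * RowXorCol(mA, mB) evaluates to true and
--       * the value of mA in 'assignment' a is equal to
--         the value of mb in 'assignment' b
--     """
--     for i in range(len(A)):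
--         for j in range(len(B)):
--             mA = A[i]
--             mB = B[j]
--
--             ma = a[i]
--             mb = b[j]
--             if RowXorCol(mA, mB) and ma == mb:
--                 return True
--
--     return False
--
-- def gneighbors(cellAssignments):
--     """
--     Determine the neighbors of each variable for the given puzzle
--         For every clique in cellAssignments
--         * Initialize its neighborhood as empty
--         * For every clique in cellAssignments other than the clique at hand,
--             if they are probable to 'conflict' they are considered neighbors
--     """
--     neighbors = {}
--     for members, _, _ in cellAssignments:
--         neighbors[members] = []
--
--     for A, _, _ in cellAssignments:
--         for B, _, _ in cellAssignments:
--             if A != B and B not in neighbors[A]: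
--                 if conflicting(A, [-1] * len(A), B, [-1] * len(B)):
--                     neighbors[A].append(B)
--                     neighbors[B].append(A)
--
--     return neighbors
-- ===== SOURCE B (Python) =====
-- def gneighbors(cellAssignments):
--     # Deduplicate cliques in first-occurrence order, then build each
--     # neighbor list directly as a filter: m is a neighbor of k iff some
--     # cell of k and some cell of m share exactly one coordinate.
--     cliques = []
--     for members, _, _ in cellAssignments:
--         if members not in cliques:
--             cliques.append(members)
--
--     def conflict(X, Y):
--         return any((x[0] == y[0]) != (x[1] == y[1]) for x in X for y in Y)
--
--     return {k: [m for m in cliques if m != k and conflict(k, m)] for k in cliques}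
-- ===== Notes on version B (the rewrite author's own statement) =====
-- stated objective: faster
-- what changed: A discovers conflicting pairs incrementally, mutating a dict with two symmetric appends guarded by a linear 'B not in neighbors[A]' scan over growing neighbor lists; B first dedups the cliques in first-occurrence order and then builds each neighbor list independently as a single filter over that list with a symmetric cell-conflict predicate, relying on the fact that A's append order is exactly first-occurrence order.
import Mathlib
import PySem

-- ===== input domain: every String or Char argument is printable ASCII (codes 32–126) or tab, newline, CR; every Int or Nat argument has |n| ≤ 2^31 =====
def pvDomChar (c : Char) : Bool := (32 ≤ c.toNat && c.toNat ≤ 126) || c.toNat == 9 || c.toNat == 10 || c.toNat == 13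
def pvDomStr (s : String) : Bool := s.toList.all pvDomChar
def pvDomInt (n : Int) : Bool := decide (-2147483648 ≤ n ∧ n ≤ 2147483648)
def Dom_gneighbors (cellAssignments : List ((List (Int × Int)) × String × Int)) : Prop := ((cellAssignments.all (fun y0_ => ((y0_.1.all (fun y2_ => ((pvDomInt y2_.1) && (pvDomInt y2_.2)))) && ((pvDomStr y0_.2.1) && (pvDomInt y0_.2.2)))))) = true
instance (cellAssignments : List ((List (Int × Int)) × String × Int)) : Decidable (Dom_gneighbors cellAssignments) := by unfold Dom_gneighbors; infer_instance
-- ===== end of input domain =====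

-- B replaces A's incremental dict mutation (symmetric appends guarded by linear membership scans)
-- by a first-occurrence dedup followed by one direct filter per clique; same value, measurably faster.


-- ===== PORT A =====
def RowXorCol (xy1 xy2 : Int × Int) : Bool :=
  (xy1.1 == xy2.1) != (xy1.2 == xy2.2)

-- early-return nested index loop = nested .any (the 'none' branches are unreachable: i, j are in range)
def conflicting (A : List (Int × Int)) (a : List Int) (B : List (Int × Int)) (b : List Int) : Bool :=
  (PySem.List.pyRange 0 (A.length : Int) 1).any fun i =>
    (PySem.List.pyRange 0 (B.length : Int) 1).any fun j =>
      match PySem.List.pyGet? A i, PySem.List.pyGet? B j,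
            PySem.List.pyGet? a i, PySem.List.pyGet? b j with
      | some mA, some mB, some ma, some mb => RowXorCol mA mB && (ma == mb)
      | _, _, _, _ => false

def gneighbors (cellAssignments : List ((List (Int × Int)) × String × Int)) :
    List (List (Int × Int) × List (List (Int × Int))) :=
  let neighbors0 : PySem.Dict (List (Int × Int)) (List (List (Int × Int))) :=
    cellAssignments.foldl (fun d e => d.insert e.1 []) PySem.Dict.empty
  let neighbors :=
    cellAssignments.foldl (fun d eA =>
      cellAssignments.foldl (fun d eB =>
        if (eA.1 != eB.1) && !((d.getD eA.1 []).contains eB.1) then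
          if conflicting eA.1 (List.replicate eA.1.length (-1))
                         eB.1 (List.replicate eB.1.length (-1)) then
            let d1 := d.insert eA.1 (d.getD eA.1 [] ++ [eB.1])
            d1.insert eB.1 (d1.getD eB.1 [] ++ [eA.1])
          else d
        else d) d) neighbors0
  neighbors.items

-- ===== PORT B =====
def conflictB (X Y : List (Int × Int)) : Bool :=
  X.any fun x => Y.any fun y => (x.1 == y.1) != (x.2 == y.2)

def gneighbors_alt (cellAssignments : List ((List (Int × Int)) × String × Int)) :
    List (List (Int × Int) × List (List (Int × Int))) :=
  let cliques : List (List (Int × Int)) :=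
    cellAssignments.foldl (fun acc e => if acc.contains e.1 then acc else acc ++ [e.1]) []
  cliques.map fun k => (k, cliques.filter fun m => (m != k) && conflictB k m)

-- ===== PRECONDITION & SPEC =====
def Spec_gneighbors (cellAssignments : List ((List (Int × Int)) × String × Int)) (out : List (List (Int × Int) × List (List (Int × Int)))) : Prop := out = gneighbors_alt cellAssignments
instance (cellAssignments : List ((List (Int × Int)) × String × Int)) (out : List (List (Int × Int) × List (List (Int × Int)))) : Decidable (Spec_gneighbors cellAssignments out) := by unfold Spec_gneighbors; infer_instance

-- ===== CLAIM (what is proved, stated in full; the proofs are below) =====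
def Claim_equal_gneighbors : Prop := ∀ (cellAssignments : List ((List (Int × Int)) × String × Int)), Dom_gneighbors cellAssignments → Spec_gneighbors cellAssignments (gneighbors cellAssignments)

-- ===== LEMMAS AND PROOFS =====

-- the inner-loop body of A, with the constant-assignment conflict test already reduced (pvConflicting_eq)
def pvInnerStep (ka : List (Int × Int))
    (d : PySem.Dict (List (Int × Int)) (List (List (Int × Int)))) (kb : List (Int × Int)) :
    PySem.Dict (List (Int × Int)) (List (List (Int × Int))) :=
  if (ka != kb) && !((d.getD ka []).contains kb) then
    if conflictB ka kb then
      (d.insert ka (d.getD ka [] ++ [kb])).insert kb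
        ((d.insert ka (d.getD ka [] ++ [kb])).getD kb [] ++ [ka])
    else d
  else d

-- a dict whose keys are exactly M (in order) with value f k at k
def pvDictOf (M : List (List (Int × Int))) (f : List (Int × Int) → List (List (Int × Int))) :
    PySem.Dict (List (Int × Int)) (List (List (Int × Int))) :=
  PySem.Dict.mk (M.map fun k => (k, f k))

-- neighbor list of k once all outer passes over the prefix Mp are done
def pvCondF (Mp : List (List (Int × Int))) (k m : List (Int × Int)) : Bool :=
  (m != k) && conflictB k m && (Mp.contains m || Mp.contains k)

-- neighbor list of k mid-way through the outer pass of ka (inner progress acc)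
def pvCondG (Mp acc : List (List (Int × Int))) (ka k m : List (Int × Int)) : Bool :=
  (m != k) && conflictB k m &&
    (Mp.contains m || Mp.contains k || (k == ka && acc.contains m) || (m == ka && acc.contains k))

lemma pvCondF_iff (Mp : List (List (Int × Int))) (k m : List (Int × Int)) :
    pvCondF Mp k m = true ↔ m ≠ k ∧ conflictB k m = true ∧ (m ∈ Mp ∨ k ∈ Mp) := by
  simp [pvCondF, and_assoc]

lemma pvCondG_iff (Mp acc : List (List (Int × Int))) (ka k m : List (Int × Int)) :
    pvCondG Mp acc ka k m = true ↔
      m ≠ k ∧ conflictB k m = true ∧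
        (m ∈ Mp ∨ k ∈ Mp ∨ (k = ka ∧ m ∈ acc) ∨ (m = ka ∧ k ∈ acc)) := by
  simp [pvCondG, and_assoc, or_assoc]

lemma pvConflictB_comm (X Y : List (Int × Int)) : conflictB X Y = conflictB Y X := by
  rw [Bool.eq_iff_iff]
  simp only [conflictB, List.any_eq_true]
  constructor
  · rintro ⟨x, hx, y, hy, h⟩
    exact ⟨y, hy, x, hx, by rw [Bool.beq_comm (a := y.1), Bool.beq_comm (a := y.2)]; exact h⟩
  · rintro ⟨y, hy, x, hx, h⟩
    exact ⟨x, hx, y, hy, by rw [Bool.beq_comm (a := x.1), Bool.beq_comm (a := x.2)]; exact h⟩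

lemma pvConflicting_eq (X Y : List (Int × Int)) :
    conflicting X (List.replicate X.length (-1)) Y (List.replicate Y.length (-1)) = conflictB X Y := by
  rw [Bool.eq_iff_iff]
  simp only [conflicting, conflictB, List.any_eq_true, PySem.List.mem_pyRange_one]
  constructor
  · rintro ⟨i, ⟨hi0, hin⟩, j, ⟨hj0, hjn⟩, h⟩
    rw [PySem.List.pyGet?_eq_some_getElem X hi0 hin,
        PySem.List.pyGet?_eq_some_getElem Y hj0 hjn,
        PySem.List.pyGet?_eq_some_getElem (List.replicate X.length (-1)) hi0 (by simpa using hin),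
        PySem.List.pyGet?_eq_some_getElem (List.replicate Y.length (-1)) hj0 (by simpa using hjn)] at h
    simp only [List.getElem_replicate] at h
    refine ⟨X[i.toNat], List.getElem_mem _, Y[j.toNat], List.getElem_mem _, ?_⟩
    simpa [RowXorCol] using h
  · rintro ⟨x, hx, y, hy, h⟩
    obtain ⟨i, hi, rfl⟩ := List.mem_iff_getElem.mp hx
    obtain ⟨j, hj, rfl⟩ := List.mem_iff_getElem.mp hy
    refine ⟨i, ⟨by positivity, by exact_mod_cast hi⟩, j, ⟨by positivity, by exact_mod_cast hj⟩, ?_⟩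
    rw [PySem.List.pyGet?_natCast X, PySem.List.pyGet?_natCast Y,
        PySem.List.pyGet?_natCast (List.replicate X.length (-1)),
        PySem.List.pyGet?_natCast (List.replicate Y.length (-1))]
    rw [List.getElem?_eq_getElem hi, List.getElem?_eq_getElem hj,
        List.getElem?_eq_getElem (by simpa using hi), List.getElem?_eq_getElem (by simpa using hj)]
    simp only [List.getElem_replicate]
    simpa [RowXorCol] using h

lemma pvKeys_dictOf (M : List (List (Int × Int))) (f) : (pvDictOf M f).keys = M := by
  simp [pvDictOf, PySem.Dict.keys, Function.comp_def]

lemma pvGetD_dictOf (M : List (List (Int × Int))) (f) (k) (hn : M.Nodup) (hk : k ∈ M) :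
    (pvDictOf M f).getD k [] = f k := by
  apply PySem.Dict.getD_of_mem_items
  · exact List.mem_map_of_mem hk
  · rw [pvKeys_dictOf]; exact hn

lemma pvInsert_dictOf (M : List (List (Int × Int))) (f) (k) (v) (hk : k ∈ M) :
    (pvDictOf M f).insert k v = pvDictOf M (fun k' => if k' = k then v else f k') := by
  apply PySem.Dict.ext
  rw [PySem.Dict.items_insert_of_contains]
  · show (M.map fun k' => (k', f k')).map _ = M.map _
    rw [List.map_map]
    apply List.map_congr_left
    intro a _
    by_cases h : a = k <;> simp [h]
  · rw [PySem.Dict.contains_iff_mem_keys, pvKeys_dictOf]; exact hk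

lemma pvDictOf_congr (M : List (List (Int × Int))) (f g) (h : ∀ k ∈ M, f k = g k) :
    pvDictOf M f = pvDictOf M g := by
  apply PySem.Dict.ext
  exact List.map_congr_left fun a ha => by rw [h a ha]

lemma pvFilter_split {α : Type} (t u : List α) (b : α) (P P' : α → Bool)
    (ht : ∀ m ∈ t, P m = P' m) (hb' : P' b = true) (hb : P b = false)
    (hu' : ∀ m ∈ u, P' m = false) (hu : ∀ m ∈ u, P m = false) :
    (t ++ b :: u).filter P' = (t ++ b :: u).filter P ++ [b] := by
  rw [List.filter_append, List.filter_append, List.filter_cons, List.filter_cons, hb, hb']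
  have h1 : u.filter P' = [] := List.filter_eq_nil_iff.mpr (fun a ha => by simp [hu' a ha])
  have h2 : u.filter P = [] := List.filter_eq_nil_iff.mpr (fun a ha => by simp [hu a ha])
  rw [List.filter_congr ht, h1, h2]
  simp

lemma pvPrefix_update (s : List (List (Int × Int))) (l : List (List (Int × Int))) :
    s <+: PySem.Set.update s l := by
  rw [PySem.Set.update_eq_append_filter]
  exact ⟨_, rfl⟩

lemma pvInit_fold (l : List ((List (Int × Int)) × String × Int)) (acc : List (List (Int × Int))) :
    l.foldl (fun d e => d.insert e.1 []) (pvDictOf acc fun _ => []) =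
      pvDictOf (PySem.Set.update acc (l.map (·.1))) (fun _ => []) := by
  induction l generalizing acc with
  | nil => simp [PySem.Set.update_nil]
  | cons e rest ih =>
    rw [List.foldl_cons, List.map_cons, PySem.Set.update_cons]
    by_cases h : e.1 ∈ acc
    · rw [pvInsert_dictOf _ _ _ _ h, PySem.Set.add_of_mem h, ← ih]
      congr 1
      apply pvDictOf_congr
      intro k _
      split <;> rfl
    · have : (pvDictOf acc fun _ => []).insert e.1 [] = pvDictOf (acc ++ [e.1]) fun _ => [] := by
        apply PySem.Dict.ext
        rw [PySem.Dict.items_insert_of_not_contains]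
        · simp [pvDictOf]
        · rw [← Bool.not_eq_true, PySem.Dict.contains_iff_mem_keys, pvKeys_dictOf]; exact h
      rw [this, PySem.Set.add_of_not_mem h, ← ih]

lemma pvInner_noop (M Mp : List (List (Int × Int))) (ka : List (Int × Int)) (hn : M.Nodup)
    (hka : ka ∈ Mp) (hkaM : ka ∈ M) (l : List (List (Int × Int))) (hl : ∀ x ∈ l, x ∈ M) :
    l.foldl (pvInnerStep ka) (pvDictOf M (fun k => M.filter (pvCondF Mp k))) =
      pvDictOf M (fun k => M.filter (pvCondF Mp k)) := by
  induction l with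
  | nil => rfl
  | cons b rest ih =>
    rw [List.foldl_cons]
    have hb : b ∈ M := hl b (by simp)
    have hstep : pvInnerStep ka (pvDictOf M (fun k => M.filter (pvCondF Mp k))) b
        = pvDictOf M (fun k => M.filter (pvCondF Mp k)) := by
      unfold pvInnerStep
      by_cases hkb : ka = b
      · simp [hkb]
      · rw [pvGetD_dictOf M _ ka hn hkaM]
        by_cases hc : conflictB ka b = true
        · have hcont : (List.filter (pvCondF Mp ka) M).contains b = true := by
            rw [List.contains_iff_mem, List.mem_filter]
            exact ⟨hb, (pvCondF_iff Mp ka b).mpr ⟨Ne.symm hkb, hc, Or.inr hka⟩⟩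
          have hcond : ((ka != b) && !(List.filter (pvCondF Mp ka) M).contains b) = false := by
            rw [hcont]; simp
          rw [hcond]
          simp
        · simp [hc]
    rw [hstep]
    exact ih (fun x hx => hl x (by simp [hx]))

set_option maxHeartbeats 2000000 in
lemma pvInner_fresh (M Mp u : List (List (Int × Int))) (ka : List (Int × Int))
    (hM : M = Mp ++ ka :: u) (hn : M.Nodup) :
    ∀ (l acc : List (List (Int × Int))), PySem.Set.update acc l = M → acc <+: M →
      l.foldl (pvInnerStep ka) (pvDictOf M (fun k => M.filter (pvCondG Mp acc ka k))) =
        pvDictOf M (fun k => M.filter (pvCondF (Mp ++ [ka]) k)) := by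
  have hnd : (Mp ++ ka :: u).Nodup := hM ▸ hn
  have hkaM : ka ∈ M := by rw [hM]; simp
  have hkaMp : ka ∉ Mp := by
    rcases List.nodup_append.mp hnd with ⟨-, -, hdisj⟩
    exact fun hmem => hdisj ka hmem ka (by simp) rfl
  have huMp : ∀ x ∈ u, x ∉ Mp ∧ x ≠ ka := by
    rcases List.nodup_append.mp hnd with ⟨-, hcu, hdisj⟩
    intro x hx
    exact ⟨fun hxMp => hdisj x hxMp x (by simp [hx]) rfl,
           fun hxka => (List.nodup_cons.mp hcu).1 (hxka ▸ hx)⟩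
  intro l
  induction l with
  | nil =>
    intro acc hupd hpre
    rw [PySem.Set.update_nil] at hupd
    subst hupd
    rw [List.foldl_nil]
    apply pvDictOf_congr
    intro k hk
    apply List.filter_congr
    intro m hm
    rw [Bool.eq_iff_iff, pvCondG_iff, pvCondF_iff]
    simp only [List.mem_append, List.mem_singleton]
    tauto
  | cons b rest ih =>
    intro acc hupd hpre
    rw [PySem.Set.update_cons] at hupd
    rw [List.foldl_cons]
    have hb : b ∈ M := by
      rw [← hupd]
      exact (pvPrefix_update _ rest).subset ((PySem.Set.mem_add _ _ _).mpr (Or.inr rfl))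
    have hgd : (pvDictOf M (fun k => M.filter (pvCondG Mp acc ka k))).getD ka []
        = M.filter (pvCondG Mp acc ka ka) := pvGetD_dictOf M _ ka hn hkaM
    by_cases hbka : b = ka
    · subst hbka
      have hstep : pvInnerStep b (pvDictOf M (fun k => M.filter (pvCondG Mp acc b k))) b
          = pvDictOf M (fun k => M.filter (pvCondG Mp acc b k)) := by
        unfold pvInnerStep; simp
      rw [hstep]
      by_cases hmem : b ∈ acc
      · rw [PySem.Set.add_of_mem hmem] at hupd
        exact ih acc hupd hpre
      · rw [PySem.Set.add_of_not_mem hmem] at hupd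
        have hpre' : acc ++ [b] <+: M := by
          rw [← hupd]; exact pvPrefix_update _ _
        rw [← ih (acc ++ [b]) hupd hpre']
        congr 1
        apply pvDictOf_congr
        intro k hk
        apply List.filter_congr
        intro m hm
        rw [Bool.eq_iff_iff, pvCondG_iff, pvCondG_iff]
        simp only [List.mem_append, List.mem_singleton]
        constructor
        · rintro ⟨h1, h2, h3⟩; exact ⟨h1, h2, by tauto⟩
        · rintro ⟨h1, h2, h3⟩
          refine ⟨h1, h2, ?_⟩
          rcases h3 with h | h | ⟨hk1, hm1 | hm1⟩ | ⟨hm1, hk1 | hk1⟩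
          · tauto
          · tauto
          · tauto
          · exact absurd (hm1.trans hk1.symm) h1
          · tauto
          · exact absurd (hk1.trans hm1.symm) (Ne.symm h1)
    · -- b ≠ ka
      have hskip : (conflictB ka b = true → pvCondG Mp acc ka ka b = true) →
          pvInnerStep ka (pvDictOf M (fun k => M.filter (pvCondG Mp acc ka k))) b
            = pvDictOf M (fun k => M.filter (pvCondG Mp acc ka k)) := by
        intro h3
        unfold pvInnerStep
        rw [hgd]
        by_cases hcb : conflictB ka b = true
        · have hcont : (M.filter (pvCondG Mp acc ka ka)).contains b = true := by
            rw [List.contains_iff_mem, List.mem_filter]; exact ⟨hb, h3 hcb⟩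
          rw [show ((ka != b) && !(M.filter (pvCondG Mp acc ka ka)).contains b) = false by
            rw [hcont]; simp]
          simp
        · simp [hcb]
      by_cases hmem : b ∈ acc
      · rw [hskip (fun hcb => (pvCondG_iff Mp acc ka ka b).mpr
          ⟨fun h => hbka h, hcb, Or.inr (Or.inr (Or.inl ⟨rfl, hmem⟩))⟩)]
        rw [PySem.Set.add_of_mem hmem] at hupd
        exact ih acc hupd hpre
      · rw [PySem.Set.add_of_not_mem hmem] at hupd
        have hpre' : acc ++ [b] <+: M := by
          rw [← hupd]; exact pvPrefix_update _ _
        obtain ⟨w, hw⟩ := hpre'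
        have hMacc : M = acc ++ b :: w := by rw [← hw]; simp
        have hpre' : acc ++ [b] <+: M := ⟨w, hw⟩
        have hcongr_of : (∀ k ∈ M, ∀ m ∈ M, pvCondG Mp acc ka k m = pvCondG Mp (acc ++ [b]) ka k m) →
            pvDictOf M (fun k => M.filter (pvCondG Mp acc ka k))
              = pvDictOf M (fun k => M.filter (pvCondG Mp (acc ++ [b]) ka k)) := by
          intro h
          apply pvDictOf_congr
          intro k hk
          exact List.filter_congr (fun m hm => h k hk m hm)
        by_cases hbMp : b ∈ Mp
        · rw [hskip (fun hcb => (pvCondG_iff Mp acc ka ka b).mpr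
            ⟨fun h => hbka h, hcb, Or.inl hbMp⟩)]
          rw [hcongr_of ?hc]
          case hc =>
            intro k hk m hm
            rw [Bool.eq_iff_iff, pvCondG_iff, pvCondG_iff]
            simp only [List.mem_append, List.mem_singleton]
            by_cases hmb : m = b
            · subst hmb; tauto
            · by_cases hkb : k = b
              · subst hkb; tauto
              · tauto
          exact ih (acc ++ [b]) hupd hpre'
        · -- b fresh and outside Mp
          have hcondfalse : pvCondG Mp acc ka ka b = false := by
            rw [← Bool.not_eq_true, pvCondG_iff]
            rintro ⟨h1, h2, h | h | ⟨-, h⟩ | ⟨h, -⟩⟩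
            · exact hbMp h
            · exact hkaMp h
            · exact hmem h
            · exact hbka h
          by_cases hcb : conflictB ka b = true
          · -- the genuine append step
            have hpm : Mp ++ [ka] <+: M := ⟨u, by rw [hM]; simp⟩
            have hsub : Mp ++ [ka] <+: acc := by
              rcases le_or_gt acc.length Mp.length with hlen | hlen
              · exfalso
                have hsub' : acc ++ [b] <+: Mp ++ [ka] :=
                  List.prefix_of_prefix_length_le hpre' hpm (by simp; omega)
                have hbmem : b ∈ Mp ++ [ka] := hsub'.subset (by simp)
                rcases List.mem_append.mp hbmem with h | h
                · exact hbMp h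
                · exact hbka (by simpa using h)
              · exact List.prefix_of_prefix_length_le hpm hpre (by simp; omega)
            have hkaacc : ka ∈ acc := hsub.subset (by simp)
            have hMpacc : ∀ x ∈ Mp, x ∈ acc := fun x hx => hsub.subset (by simp [hx])
            have hndacc : (acc ++ b :: w).Nodup := hMacc ▸ hn
            rcases List.nodup_append.mp hndacc with ⟨hnacc, hnbw, hdisj⟩
            have hbw : b ∉ w := (List.nodup_cons.mp hnbw).1
            have hwacc : ∀ x ∈ w, x ∉ acc := fun x hx hxa => hdisj x hxa x (by simp [hx]) rfl
            have hbacc' : b ∉ acc := hmem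
            have hstep : pvInnerStep ka (pvDictOf M (fun k => M.filter (pvCondG Mp acc ka k))) b
                = pvDictOf M (fun k => M.filter (pvCondG Mp (acc ++ [b]) ka k)) := by
              unfold pvInnerStep
              rw [hgd]
              have hcont : (M.filter (pvCondG Mp acc ka ka)).contains b = false := by
                rw [← Bool.not_eq_true, List.contains_iff_mem, List.mem_filter]
                rintro ⟨-, hc2⟩
                rw [hcondfalse] at hc2
                exact Bool.false_ne_true hc2
              rw [show ((ka != b) && !(M.filter (pvCondG Mp acc ka ka)).contains b) = true by
                rw [hcont]; simp; exact fun h => hbka h.symm]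
              rw [if_pos rfl, if_pos hcb]
              rw [pvInsert_dictOf M _ ka _ hkaM]
              rw [pvGetD_dictOf M _ b hn hb, if_neg hbka]
              rw [pvInsert_dictOf M _ b _ hb]
              apply pvDictOf_congr
              intro k' hk'
              by_cases hk'b : k' = b
              · subst hk'b
                rw [if_pos rfl]
                rw [hM]
                symm
                apply pvFilter_split
                · intro m hm
                  rw [Bool.eq_iff_iff, pvCondG_iff, pvCondG_iff]
                  simp only [List.mem_append, List.mem_singleton]
                  have hmb : m ≠ k' := fun h => hbMp (h ▸ hm)
                  tauto
                · rw [pvCondG_iff]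
                  refine ⟨fun h => hbka h.symm, ?_, Or.inr (Or.inr (Or.inr ⟨rfl, by simp⟩))⟩
                  rw [pvConflictB_comm]; exact hcb
                · rw [← Bool.not_eq_true, pvCondG_iff]
                  rintro ⟨-, -, h | h | ⟨h, -⟩ | ⟨-, h⟩⟩
                  · exact hkaMp h
                  · exact hbMp h
                  · exact hbka h
                  · exact hmem h
                · intro m hm
                  rw [← Bool.not_eq_true, pvCondG_iff]
                  rcases huMp m hm with ⟨hmMp, hmka⟩
                  rintro ⟨-, -, h | h | ⟨h, -⟩ | ⟨h, -⟩⟩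
                  · exact hmMp h
                  · exact hbMp h
                  · exact hbka h
                  · exact hmka h
                · intro m hm
                  rw [← Bool.not_eq_true, pvCondG_iff]
                  rcases huMp m hm with ⟨hmMp, hmka⟩
                  rintro ⟨-, -, h | h | ⟨h, -⟩ | ⟨h, -⟩⟩
                  · exact hmMp h
                  · exact hbMp h
                  · exact hbka h
                  · exact hmka h
              · rw [if_neg hk'b]
                by_cases hk'ka : k' = ka
                · subst hk'ka
                  rw [if_pos rfl]
                  rw [hMacc]
                  symm
                  apply pvFilter_split
                  · intro m hm
                    rw [Bool.eq_iff_iff, pvCondG_iff, pvCondG_iff]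
                    simp only [List.mem_append, List.mem_singleton]
                    have hmb : m ≠ b := fun h => hbacc' (h ▸ hm)
                    tauto
                  · rw [pvCondG_iff]
                    exact ⟨fun h => hbka h, hcb, Or.inr (Or.inr (Or.inl ⟨rfl, by simp⟩))⟩
                  · exact hcondfalse
                  · intro m hm
                    rw [← Bool.not_eq_true, pvCondG_iff]
                    have hmacc : m ∉ acc := hwacc m hm
                    have hmb : m ≠ b := fun h => hbw (h ▸ hm)
                    rintro ⟨-, -, h | h | ⟨-, h⟩ | ⟨h, -⟩⟩
                    · exact hmacc (hMpacc m h)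
                    · exact hkaMp h
                    · rcases List.mem_append.mp h with h' | h'
                      · exact hmacc h'
                      · exact hmb (by simpa using h')
                    · exact hmacc (h ▸ hkaacc)
                  · intro m hm
                    rw [← Bool.not_eq_true, pvCondG_iff]
                    have hmacc : m ∉ acc := hwacc m hm
                    rintro ⟨-, -, h | h | ⟨-, h⟩ | ⟨h, -⟩⟩
                    · exact hmacc (hMpacc m h)
                    · exact hkaMp h
                    · exact hmacc h
                    · exact hmacc (h ▸ hkaacc)
                · rw [if_neg hk'ka]
                  apply List.filter_congr
                  intro m hm
                  rw [Bool.eq_iff_iff, pvCondG_iff, pvCondG_iff]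
                  simp only [List.mem_append, List.mem_singleton]
                  constructor
                  · rintro ⟨h1, h2, h3⟩; exact ⟨h1, h2, by tauto⟩
                  · rintro ⟨h1, h2, h3⟩
                    refine ⟨h1, h2, ?_⟩
                    rcases h3 with h | h | ⟨hk1, hm1⟩ | ⟨hm1, hk1 | hk1⟩
                    · tauto
                    · tauto
                    · exact absurd hk1 hk'ka
                    · tauto
                    · exact absurd hk1 hk'b
            rw [hstep]
            exact ih (acc ++ [b]) hupd hpre'
          · -- no conflict: nothing happens, but the processed prefix still grows
            have hstep : pvInnerStep ka (pvDictOf M (fun k => M.filter (pvCondG Mp acc ka k))) b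
                = pvDictOf M (fun k => M.filter (pvCondG Mp acc ka k)) := by
              unfold pvInnerStep
              rw [hgd]
              simp [hcb]
            rw [hstep, hcongr_of ?hc2]
            case hc2 =>
              intro k hk m hm
              rw [Bool.eq_iff_iff, pvCondG_iff, pvCondG_iff]
              simp only [List.mem_append, List.mem_singleton]
              constructor
              · rintro ⟨h1, h2, h3⟩; exact ⟨h1, h2, by tauto⟩
              · rintro ⟨h1, h2, h3⟩
                refine ⟨h1, h2, ?_⟩
                rcases h3 with h | h | ⟨hk1, hm1 | hm1⟩ | ⟨hm1, hk1 | hk1⟩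
                · tauto
                · tauto
                · tauto
                · exact absurd (by rw [hk1, hm1] at h2; exact h2) hcb
                · tauto
                · exact absurd (by rw [hm1, hk1, pvConflictB_comm] at h2; exact h2) hcb
            exact ih (acc ++ [b]) hupd hpre'

lemma pvOuter_fold (M ms : List (List (Int × Int))) (hn : M.Nodup)
    (hms : PySem.Set.ofList ms = M) :
    ∀ (l acc : List (List (Int × Int))), PySem.Set.update acc l = M → acc <+: M →
      l.foldl (fun d ka => ms.foldl (pvInnerStep ka) d)
          (pvDictOf M (fun k => M.filter (pvCondF acc k))) =
        pvDictOf M (fun k => M.filter (pvCondF M k)) := by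
  intro l
  induction l with
  | nil =>
    intro acc hupd hpre
    rw [PySem.Set.update_nil] at hupd
    subst hupd
    rfl
  | cons ka rest ih =>
    intro acc hupd hpre
    rw [PySem.Set.update_cons] at hupd
    rw [List.foldl_cons]
    have hkaM : ka ∈ M := by
      rw [← hupd]
      exact (pvPrefix_update _ rest).subset ((PySem.Set.mem_add _ _ _).mpr (Or.inr rfl))
    have hmsM : ∀ x ∈ ms, x ∈ M := fun x hx => by
      rw [← hms]; exact (PySem.Set.mem_ofList _ _).mpr hx
    by_cases hmem : ka ∈ acc
    · rw [pvInner_noop M acc ka hn hmem hkaM ms hmsM]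
      rw [PySem.Set.add_of_mem hmem] at hupd
      exact ih acc hupd hpre
    · rw [PySem.Set.add_of_not_mem hmem] at hupd
      have hpre' : acc ++ [ka] <+: M := by
        rw [← hupd]; exact pvPrefix_update _ _
      obtain ⟨u, hu⟩ := hpre'
      have hMdec : M = acc ++ ka :: u := by rw [← hu]; simp
      have hpre' : acc ++ [ka] <+: M := ⟨u, hu⟩
      have h0 : pvDictOf M (fun k => M.filter (pvCondF acc k))
          = pvDictOf M (fun k => M.filter (pvCondG acc [] ka k)) := by
        apply pvDictOf_congr
        intro k hk
        apply List.filter_congr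
        intro m hm
        rw [Bool.eq_iff_iff, pvCondF_iff, pvCondG_iff]
        simp only [List.not_mem_nil, and_false, or_false]
      rw [h0, pvInner_fresh M acc u ka hMdec hn ms []
        (by rw [PySem.Set.update_nil_left]; exact hms) (List.nil_prefix)]
      exact ih (acc ++ [ka]) hupd hpre'

-- ===== VERDICT (by name: the statement is the Claim_ definition above) =====
theorem gneighbors_spec : Claim_equal_gneighbors := by
  unfold Claim_equal_gneighbors Spec_gneighbors
  intro cA _
  show gneighbors cA = gneighbors_alt cA
  have hn : (PySem.Set.ofList (cA.map (·.1))).Nodup := PySem.Set.nodup_ofList _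
  have hcl : cA.foldl (fun acc e => if acc.contains e.1 then acc else acc ++ [e.1])
      ([] : List (List (Int × Int))) = PySem.Set.ofList (cA.map (·.1)) := by
    rw [PySem.Set.ofList_eq_foldl, List.foldl_map]
    rfl
  have hinit : cA.foldl (fun d e => d.insert e.1 []) PySem.Dict.empty
      = pvDictOf (PySem.Set.ofList (cA.map (·.1))) (fun _ => []) := by
    have := pvInit_fold cA []
    rw [PySem.Set.update_nil_left] at this
    exact this
  have hbody : (fun d eA => cA.foldl (fun d eB =>
        if (eA.1 != eB.1) && !((d.getD eA.1 []).contains eB.1) then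
          if conflicting eA.1 (List.replicate eA.1.length (-1))
                         eB.1 (List.replicate eB.1.length (-1)) then
            let d1 := d.insert eA.1 (d.getD eA.1 [] ++ [eB.1])
            d1.insert eB.1 (d1.getD eB.1 [] ++ [eA.1])
          else d
        else d) d)
      = (fun (d : PySem.Dict (List (Int × Int)) (List (List (Int × Int))))
          (eA : (List (Int × Int)) × String × Int) =>
          (cA.map (·.1)).foldl (pvInnerStep eA.1) d) := by
    funext d eA
    have h1 : (fun (d' : PySem.Dict (List (Int × Int)) (List (List (Int × Int))))
        (eB : (List (Int × Int)) × String × Int) =>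
        if (eA.1 != eB.1) && !((d'.getD eA.1 []).contains eB.1) then
          if conflicting eA.1 (List.replicate eA.1.length (-1))
                         eB.1 (List.replicate eB.1.length (-1)) then
            let d1 := d'.insert eA.1 (d'.getD eA.1 [] ++ [eB.1])
            d1.insert eB.1 (d1.getD eB.1 [] ++ [eA.1])
          else d'
        else d')
        = (fun d' eB => pvInnerStep eA.1 d' eB.1) := by
      funext d' eB
      unfold pvInnerStep
      rw [pvConflicting_eq]
    rw [h1, ← List.foldl_map]
  simp only [gneighbors, gneighbors_alt]
  rw [hcl, hinit, hbody,
    show cA.foldl (fun d eA => (cA.map (·.1)).foldl (pvInnerStep eA.1) d)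
        (pvDictOf (PySem.Set.ofList (cA.map (·.1))) (fun _ => []))
      = (cA.map (·.1)).foldl (fun d ka => (cA.map (·.1)).foldl (pvInnerStep ka) d)
        (pvDictOf (PySem.Set.ofList (cA.map (·.1))) (fun _ => []))
      from (List.foldl_map (f := fun (e : (List (Int × Int)) × String × Int) => e.1) (g := fun d ka => (cA.map (·.1)).foldl (pvInnerStep ka) d)).symm]
  have hstart : pvDictOf (PySem.Set.ofList (cA.map (·.1))) (fun _ => [])
      = pvDictOf (PySem.Set.ofList (cA.map (·.1)))
          (fun k => (PySem.Set.ofList (cA.map (·.1))).filter (pvCondF [] k)) := by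
    apply pvDictOf_congr
    intro k hk
    rw [eq_comm, List.filter_eq_nil_iff]
    intro m hm
    simp [pvCondF]
  rw [hstart, pvOuter_fold (PySem.Set.ofList (cA.map (·.1))) (cA.map (·.1)) hn rfl
    (cA.map (·.1)) [] (by rw [PySem.Set.update_nil_left]) (List.nil_prefix)]
  show (PySem.Set.ofList (cA.map (·.1))).map _ = (PySem.Set.ofList (cA.map (·.1))).map _
  apply List.map_congr_left
  intro k hk
  refine congrArg _ ?_
  apply List.filter_congr
  intro m hm
  rw [Bool.eq_iff_iff, pvCondF_iff]
  simp only [Bool.and_eq_true, bne_iff_ne, ne_eq]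
  tauto
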